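-- pv_equiv track=rewrite | github.com/luuismrtn/Advent-Of-Code-42-2024 | day22/day22+.py | gen_num
-- ===== SOURCE A (Python) =====
-- def gen_num(num, n):
--     num = int(num)
--     result = num
--     sol = []
--     for _ in range(n):
--         result = (result * 64) ^ result
--         result %= 16777216
--
--         result = (result // 32) ^ result
--         result %= 16777216
--
--         result = (result * 2048) ^ result
--         result %= 16777216
--         result = str(result)
--         sol.append(int(result[-1]))
--         result = int(result)
--     return sol
-- ===== SOURCE B (Python) =====
-- # One step of the generator is a linear map over GF(2)^24 (each xor-with-shift and
-- # the mod-2^24 truncation are GF(2)-linear), so the next secret is the XOR of the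
-- # precomputed images of the set bits of the current secret.
-- _MASKS = [137283, 274566, 549132, 1098264, 2196528, 4391009, 8782018, 786820,
--           1573640, 3147280, 6294560, 12589120, 8401024, 24832, 49664, 99328,
--           198656, 397312, 270336, 540672, 1081344, 2162688, 4325376, 8650752]
--
--
-- def _next(s):
--     r = 0
--     for i in range(24):
--         if (s >> i) & 1:
--             r ^= _MASKS[i]
--     return r
--
--
-- def gen_num(num, n):
--     num = int(num)
--     s = num % 16777216
--     sol = []
--     for _ in range(n):
--         s = _next(s)
--         sol.append(s % 10)
--     return sol
-- ===== Notes on version B (the rewrite author's own statement) =====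
-- stated objective: alternative
-- what changed: B treats one generator step as a linear map over GF(2)^24 and computes each next secret as the XOR of 24 precomputed basis-image masks selected by the set bits of the state (after reducing the seed mod 2^24 once), with the last digit taken as s % 10, instead of A's shift/xor/mod instruction sequence and str()-indexing digit extraction.
import Mathlib
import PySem

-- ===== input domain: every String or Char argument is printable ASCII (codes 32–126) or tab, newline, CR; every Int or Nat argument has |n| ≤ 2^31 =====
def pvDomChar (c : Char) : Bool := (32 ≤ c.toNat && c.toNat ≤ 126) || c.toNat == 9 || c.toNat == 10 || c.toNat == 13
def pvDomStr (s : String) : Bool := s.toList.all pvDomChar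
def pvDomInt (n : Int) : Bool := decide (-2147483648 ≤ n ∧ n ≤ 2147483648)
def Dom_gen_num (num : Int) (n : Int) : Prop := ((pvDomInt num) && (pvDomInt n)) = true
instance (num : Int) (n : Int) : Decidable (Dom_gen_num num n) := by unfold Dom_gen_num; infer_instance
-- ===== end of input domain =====

-- B computes each next secret as a table-driven GF(2) linear map (XOR of 24 precomputed
-- basis-image masks selected by the set bits of the state, seed reduced mod 2^24 once,
-- digit taken as s % 10) instead of A's shift/xor/mod sequence with str()-indexing
-- digit extraction; an alternative algorithm, not claimed faster.

-- ===== PORT A =====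
-- one iteration of A's loop body: the three xor/mod steps, then
--   result = str(result); sol.append(int(result[-1])); result = int(result)
-- `result = int(result)` re-parses str(result), which returns the very same integer for every
-- int, so the port keeps r3 as the loop's integer state (exact); int(result[-1]) is ported
-- literally (str(n), s[-1], int(single-char string); the .getD 0 defaults are unreachable:
-- str(r3) is a nonempty digit string since 0 ≤ r3 < 16777216).
def gen_numBody (st : Int × List Int) (_i : Int) : Int × List Int :=
  let r1 := PySem.Int.mod (PySem.Int.bxor (st.1 * 64) st.1) 16777216
  let r2 := PySem.Int.mod (PySem.Int.bxor (PySem.Int.floordiv r1 32) r1) 16777216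
  let r3 := PySem.Int.mod (PySem.Int.bxor (r2 * 2048) r2) 16777216
  let s  := PySem.Int.toStr r3
  let d  := ((PySem.Str.pyGet? s (-1)).bind (fun ch =>
               PySem.Int.ofStr? (String.ofList [ch]))).getD 0
  (r3, st.2 ++ [d])

def gen_num (num : Int) (n : Int) : List Int :=
  -- num = int(num) is the identity on an int argument
  ((PySem.List.pyRange 0 n 1).foldl gen_numBody (num, [])).2

-- ===== PORT B =====
-- the 24 precomputed basis-image masks _MASKS of Source B
def pvMasks : List Int :=
  [137283, 274566, 549132, 1098264, 2196528, 4391009, 8782018, 786820,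
   1573640, 3147280, 6294560, 12589120, 8401024, 24832, 49664, 99328,
   198656, 397312, 270336, 540672, 1081344, 2162688, 4325376, 8650752]

-- _next(s): r = 0; for i in range(24): if (s >> i) & 1: r ^= _MASKS[i]
-- (i.toNat is exact: i ranges over 0..23; _MASKS[i] is always in range, so .getD 0 is unreachable)
def pvNext (s : Int) : Int :=
  (PySem.List.pyRange 0 24 1).foldl
    (fun r i =>
      if PySem.Int.band (s >>> i.toNat) 1 ≠ 0 then
        PySem.Int.bxor r ((PySem.List.pyGet? pvMasks i).getD 0)
      else r) 0

def gen_num_alt (num : Int) (n : Int) : List Int :=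
  -- num = int(num) is the identity on an int argument; then s = num % 16777216
  ((PySem.List.pyRange 0 n 1).foldl
    (fun (acc : Int × List Int) _ =>
      let s := pvNext acc.1
      (s, acc.2 ++ [PySem.Int.mod s 10]))
    (PySem.Int.mod num 16777216, [])).2

-- ===== PRECONDITION & SPEC =====
def Spec_gen_num (num : Int) (n : Int) (out : List Int) : Prop := out = gen_num_alt num n
instance (num : Int) (n : Int) (out : List Int) : Decidable (Spec_gen_num num n out) := by unfold Spec_gen_num; infer_instance

-- ===== CLAIM =====
def Claim_equal_gen_num : Prop := ∀ (num : Int) (n : Int), Dom_gen_num num n → Spec_gen_num num n (gen_num num n)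

-- ===== LEMMAS AND PROOFS =====

-- A's one-step state update (the r1/r2/r3 chain of gen_numBody), split for rewriting
def sub1 (r : Int) : Int := PySem.Int.mod (PySem.Int.bxor (r * 64) r) 16777216
def rest2 (r1 : Int) : Int :=
  PySem.Int.mod (PySem.Int.bxor
    ((PySem.Int.mod (PySem.Int.bxor (PySem.Int.floordiv r1 32) r1) 16777216) * 2048)
    (PySem.Int.mod (PySem.Int.bxor (PySem.Int.floordiv r1 32) r1) 16777216)) 16777216
def stepI (r : Int) : Int := rest2 (sub1 r)

-- the same map on Nat, written with shifts
def sN1 (x : Nat) : Nat := ((x <<< 6) ^^^ x) % 16777216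
def sN2 (x : Nat) : Nat := ((x >>> 5) ^^^ x) % 16777216
def sN3 (x : Nat) : Nat := ((x <<< 11) ^^^ x) % 16777216
def stepN (x : Nat) : Nat := sN3 (sN2 (sN1 x))

-- ---------- A-side: the string round-trip extracts r % 10 ----------

-- `Nat.toDigitsCore` only prepends to its accumulator
lemma toDigitsCore_suffix (f : Nat) : ∀ (n : Nat) (l : List Char),
    ∃ p, Nat.toDigitsCore 10 f n l = p ++ l := by
  induction f with
  | zero => intro n l; exact ⟨[], rfl⟩
  | succ f ih =>
      intro n l
      rw [Nat.toDigitsCore]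
      by_cases h : n / 10 = 0
      · simp only [h]
        exact ⟨[(n % 10).digitChar], rfl⟩
      · simp only [if_neg h]
        obtain ⟨p, hp⟩ := ih (n / 10) ((n % 10).digitChar :: l)
        exact ⟨p ++ [(n % 10).digitChar], by simpa using hp⟩

-- the last character of str(m) is the digit character of m % 10
lemma toDigits_last (m : Nat) :
    ∃ p, Nat.toDigits 10 m = p ++ [(m % 10).digitChar] := by
  rw [Nat.toDigits, Nat.toDigitsCore]
  by_cases h : m / 10 = 0
  · simp only [h]; exact ⟨[], rfl⟩
  · simp only [if_neg h]
    obtain ⟨p, hp⟩ := toDigitsCore_suffix m (m / 10) [(m % 10).digitChar]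
    exact ⟨p, hp⟩

-- xs[-1] on a nonempty list is its last element
lemma pyGet?_neg_one_concat {α : Type} (p : List α) (c : α) :
    PySem.List.pyGet? (p ++ [c]) (-1) = some c := by
  simp [PySem.List.pyGet?, PySem.List.pyIdx?]

-- int("<single digit char>") parses the digit
lemma ofChars?_digitChar (k : Nat) (hk : k < 10) :
    PySem.Int.ofChars? [Nat.digitChar k] = some (k : Int) := by
  interval_cases k <;> decide

-- the digit A extracts through the string round-trip is r % 10
lemma digit_eq (r : Int) (h : 0 ≤ r) :
    ((PySem.Str.pyGet? (PySem.Int.toStr r) (-1)).bind (fun ch =>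
        PySem.Int.ofStr? (String.ofList [ch]))).getD 0 = PySem.Int.mod r 10 := by
  obtain ⟨m, rfl⟩ : ∃ m : Nat, r = (m : Int) := ⟨r.toNat, (Int.toNat_of_nonneg h).symm⟩
  have htc : (PySem.Int.toStr (m : Int)).toList = Nat.toDigits 10 m := by
    rw [PySem.Int.toList_toStr, PySem.Int.toChars]
    simp
  obtain ⟨p, hp⟩ := toDigits_last m
  rw [PySem.Str.pyGet?, htc, hp, PySem.Chars.pyGet?, pyGet?_neg_one_concat]
  simp only [Option.bind_some, PySem.Int.ofStr?_ofList]
  rw [ofChars?_digitChar (m % 10) (Nat.mod_lt _ (by norm_num))]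
  simp

lemma body_eq (st : Int × List Int) (i : Int) :
    gen_numBody st i = (stepI st.1, st.2 ++ [PySem.Int.mod (stepI st.1) 10]) := by
  simp only [gen_numBody, stepI, rest2, sub1]
  rw [digit_eq _ (PySem.Int.mod_nonneg _ (by norm_num))]

lemma stepI_nonneg (r : Int) : 0 ≤ stepI r := by
  unfold stepI rest2
  exact PySem.Int.mod_nonneg _ (by norm_num)

lemma stepI_lt (r : Int) : stepI r < 16777216 := by
  unfold stepI rest2
  exact PySem.Int.mod_lt _ (by norm_num)

-- ---------- stepI on a Nat cast is stepN ----------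

lemma stepI_natCast (x : Nat) : stepI (x : Int) = ((stepN x : Nat) : Int) := by
  have h64 : ((x : Int) * (64 : Int)) = ((x <<< 6 : Nat) : Int) := by
    rw [Nat.shiftLeft_eq]; push_cast; ring
  have hM : (16777216 : Int) = ((16777216 : Nat) : Int) := by norm_num
  have h32 : ∀ y : Nat, PySem.Int.floordiv ((y : Nat) : Int) (32 : Int) = ((y >>> 5 : Nat) : Int) := by
    intro y
    rw [Nat.shiftRight_eq_div_pow, show ((32:Int)) = ((32:Nat):Int) from by norm_num,
      PySem.Int.floordiv_natCast]
  have h2048 : ∀ y : Nat, ((y : Nat) : Int) * (2048 : Int) = ((y <<< 11 : Nat) : Int) := by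
    intro y; rw [Nat.shiftLeft_eq]; push_cast; ring
  simp only [stepI, rest2, sub1, stepN, sN1, sN2, sN3]
  rw [h64, PySem.Int.bxor_natCast, hM, PySem.Int.mod_natCast,
    h32, PySem.Int.bxor_natCast, PySem.Int.mod_natCast,
    h2048, PySem.Int.bxor_natCast, PySem.Int.mod_natCast]

-- ---------- stepN is GF(2)-linear ----------

lemma sN1_linear (a b : Nat) : sN1 (a ^^^ b) = sN1 a ^^^ sN1 b := by
  simp only [sN1, show (16777216:Nat) = 2^24 from by norm_num]
  rw [Nat.shiftLeft_xor_distrib, ← Nat.xor_mod_two_pow]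
  congr 1
  ac_rfl

lemma sN2_linear (a b : Nat) : sN2 (a ^^^ b) = sN2 a ^^^ sN2 b := by
  simp only [sN2, show (16777216:Nat) = 2^24 from by norm_num]
  rw [Nat.shiftRight_xor_distrib, ← Nat.xor_mod_two_pow]
  congr 1
  ac_rfl

lemma sN3_linear (a b : Nat) : sN3 (a ^^^ b) = sN3 a ^^^ sN3 b := by
  simp only [sN3, show (16777216:Nat) = 2^24 from by norm_num]
  rw [Nat.shiftLeft_xor_distrib, ← Nat.xor_mod_two_pow]
  congr 1
  ac_rfl

lemma stepN_linear (a b : Nat) : stepN (a ^^^ b) = stepN a ^^^ stepN b := by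
  simp only [stepN, sN1_linear, sN2_linear, sN3_linear]

-- ---------- the masks are the basis images of stepN ----------

lemma masks_eq : ∀ k : Nat, k < 24 →
    (PySem.List.pyGet? pvMasks ((k : Nat) : Int)).getD 0 = ((stepN (2 ^ k) : Nat) : Int) := by
  decide

-- ---------- per-bit condition of the B loop ----------

lemma band_cast_ne_iff (y : Nat) : (PySem.Int.band ((y : Nat) : Int) 1 ≠ 0) ↔ y % 2 = 1 := by
  rw [PySem.Int.band_one,
    show PySem.Int.mod ((y : Nat) : Int) 2 = (((y % 2 : Nat)) : Int) from by
      exact_mod_cast PySem.Int.mod_natCast y 2]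
  constructor
  · intro h
    have h0 : y % 2 ≠ 0 := by exact_mod_cast h
    omega
  · intro h hc
    have h0 : y % 2 = 0 := by exact_mod_cast hc
    omega

lemma testBit_of_mod (x k : Nat) : x.testBit k = true ↔ (x >>> k) % 2 = 1 := by
  rw [Nat.testBit_eq_decide_div_mod_eq, Nat.shiftRight_eq_div_pow]
  simp

-- ---------- bit-prefix decomposition of mod 2^k ----------

lemma mod_pow_succ_xor (x k : Nat) :
    x % 2 ^ (k + 1) = (if x.testBit k then 2 ^ k else 0) ^^^ (x % 2 ^ k) := by
  apply Nat.eq_of_testBit_eq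
  intro i
  rw [Nat.testBit_xor, Nat.testBit_mod_two_pow, Nat.testBit_mod_two_pow]
  split_ifs with hb
  · rw [Nat.testBit_two_pow]
    rcases lt_trichotomy i k with h | h | h
    · simp [Nat.lt_succ_of_lt h, h, Nat.ne_of_gt h]
    · subst h
      simp [hb]
    · have h1 : ¬ i < k + 1 := by omega
      have h2 : ¬ i < k := by omega
      simp [h1, h2, Nat.ne_of_lt h]
  · have hb' : x.testBit k = false := by simpa using hb
    rw [Nat.zero_testBit, Bool.false_xor]
    rcases lt_trichotomy i k with h | h | h
    · simp [Nat.lt_succ_of_lt h, h]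
    · subst h
      simp [hb']
    · have h1 : ¬ i < k + 1 := by omega
      have h2 : ¬ i < k := by omega
      simp [h1, h2]

-- ---------- the B fold computes stepN on the bit prefix ----------

lemma fold_prefix (x : Nat) : ∀ k : Nat, k ≤ 24 →
    (PySem.List.pyRange 0 ((k : Nat) : Int) 1).foldl
      (fun r i =>
        if PySem.Int.band (((x : Nat) : Int) >>> i.toNat) 1 ≠ 0 then
          PySem.Int.bxor r ((PySem.List.pyGet? pvMasks i).getD 0)
        else r) 0
    = ((stepN (x % 2 ^ k) : Nat) : Int) := by
  intro k
  induction k with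
  | zero =>
      intro _
      rw [show (((0:Nat)) : Int) = 0 from by simp,
        show PySem.List.pyRange 0 0 1 = [] from rfl]
      rw [List.foldl_nil, Nat.pow_zero, Nat.mod_one]
      decide
  | succ k ih =>
      intro hk
      have hk' : k ≤ 24 := Nat.le_of_succ_le hk
      have hk24 : k < 24 := hk
      have hcast : (((k + 1 : Nat)) : Int) = ((k : Nat) : Int) + 1 := by push_cast; ring
      rw [hcast, PySem.List.pyRange_one_succ_right (by exact_mod_cast Nat.zero_le k),
        List.foldl_append, ih hk']
      simp only [List.foldl_cons, List.foldl_nil]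
      rw [mod_pow_succ_xor x k]
      by_cases hb : x.testBit k = true
      · rw [if_pos hb]
        split_ifs with hc
        · rw [masks_eq k hk24, PySem.Int.bxor_natCast, ← stepN_linear]
          simp [Nat.xor_comm]
        · exfalso
          simp only [Int.toNat_natCast, Int.shiftRight_natCast] at hc
          rw [band_cast_ne_iff] at hc
          exact hc ((testBit_of_mod x k).mp hb)
      · have hb' : x.testBit k = false := by simpa using hb
        rw [if_neg hb]
        split_ifs with hc
        · exfalso
          simp only [Int.toNat_natCast, Int.shiftRight_natCast] at hc
          rw [band_cast_ne_iff] at hc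
          exact hb ((testBit_of_mod x k).mpr hc)
        · simp

lemma pvNext_eq (x : Nat) (hx : x < 16777216) :
    pvNext ((x : Nat) : Int) = stepI ((x : Nat) : Int) := by
  have h := fold_prefix x 24 le_rfl
  have hx' : x < 2 ^ 24 := lt_of_lt_of_le hx (by norm_num)
  rw [Nat.mod_eq_of_lt hx'] at h
  unfold pvNext
  rw [show ((24:Int)) = (((24:Nat)):Int) from by norm_num, h, stepI_natCast]

-- ---------- xor commutes with mod 2^24 also on negative ints ----------

-- 2^24 - 1 - u is xor with the all-ones mask
lemma sub_ones_eq_xor {u : Nat} (h : u < 16777216) :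
    16777215 - u = 16777215 ^^^ u := by
  have h24 : u < 2 ^ 24 := lt_of_lt_of_le h (by norm_num)
  have h1 : 16777215 - u = 2 ^ 24 - (u + 1) := by omega
  have h2 : (16777215 : Nat) = 2 ^ 24 - 1 := by norm_num
  rw [h1, h2]
  apply Nat.eq_of_testBit_eq
  intro i
  rw [Nat.testBit_two_pow_sub_succ h24, Nat.testBit_xor, Nat.testBit_two_pow_sub_one]
  by_cases hi : i < 24
  · cases hu : u.testBit i <;> simp [hi]
  · have hfu : u.testBit i = false :=
      Nat.testBit_lt_two_pow (lt_of_lt_of_le h24 (Nat.pow_le_pow_right (by norm_num) (by omega)))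
    simp [hi, hfu]

-- -(m+1) mod 2^24 is the complement of m's low bits
lemma neg_succ_emod (m : Nat) :
    (-(m : Int) - 1) % 16777216 = ((16777215 - m % 16777216 : Nat) : Int) := by
  have hlt : m % 16777216 < 16777216 := Nat.mod_lt _ (by norm_num)
  have hdm := Nat.div_add_mod m 16777216
  have hle : m % 16777216 ≤ 16777215 := by omega
  have h1 : (-(m : Int) - 1) =
      ((16777215 - m % 16777216 : Nat) : Int) + 16777216 * (-((m / 16777216 : Nat) : Int) - 1) := by
    push_cast [hle]
    omega
  rw [h1, Int.add_mul_emod_self_left,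
    Int.emod_eq_of_lt (by positivity) (by exact_mod_cast by omega : ((16777215 - m % 16777216 : Nat) : Int) < 16777216)]

-- a % 2^24 as a Nat for nonnegative a
lemma emod_toNat (a : Int) (ha : 0 ≤ a) :
    a % 16777216 = ((a.toNat % 16777216 : Nat) : Int) := by
  conv_lhs => rw [← Int.toNat_of_nonneg ha]
  norm_cast

-- xor/mod-2^24 congruence for same-sign ints (the only shape stepI meets)
lemma bxor_emod (a b : Int) (hsgn : 0 ≤ a ↔ 0 ≤ b) :
    (PySem.Int.bxor a b) % 16777216 = PySem.Int.bxor (a % 16777216) (b % 16777216) := by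
  have hM : (16777216 : Nat) = 2 ^ 24 := by norm_num
  by_cases ha : 0 ≤ a
  · have hb : 0 ≤ b := hsgn.mp ha
    rw [PySem.Int.bxor_of_nonneg ha hb, emod_toNat a ha, emod_toNat b hb,
      PySem.Int.bxor_natCast, emod_toNat _ (by positivity), Int.toNat_natCast]
    congr 1
    rw [hM, Nat.xor_mod_two_pow]
  · have hb : ¬ 0 ≤ b := fun h => ha (hsgn.mpr h)
    have ha' : (0:Int) ≤ -a - 1 := by omega
    have hb' : (0:Int) ≤ -b - 1 := by omega
    have hae : a = -(((-a - 1).toNat : Nat) : Int) - 1 := by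
      rw [Int.toNat_of_nonneg ha']; ring
    have hbe : b = -(((-b - 1).toNat : Nat) : Int) - 1 := by
      rw [Int.toNat_of_nonneg hb']; ring
    set ma := (-a - 1).toNat with hma
    set mb := (-b - 1).toNat with hmb
    have hx : PySem.Int.bxor a b = ((ma ^^^ mb : Nat) : Int) := by
      unfold PySem.Int.bxor
      rw [if_neg ha, if_neg hb]
    rw [hx, emod_toNat _ (by positivity), Int.toNat_natCast,
      show a % 16777216 = ((16777215 - ma % 16777216 : Nat) : Int) from by
        rw [hae]; exact neg_succ_emod ma,
      show b % 16777216 = ((16777215 - mb % 16777216 : Nat) : Int) from by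
        rw [hbe]; exact neg_succ_emod mb,
      PySem.Int.bxor_natCast]
    congr 1
    rw [hM, Nat.xor_mod_two_pow, ← hM,
      sub_ones_eq_xor (Nat.mod_lt _ (by norm_num)),
      sub_ones_eq_xor (Nat.mod_lt _ (by norm_num)),
      show (16777215 ^^^ ma % 16777216) ^^^ (16777215 ^^^ mb % 16777216)
        = (16777215 ^^^ 16777215) ^^^ (ma % 16777216 ^^^ mb % 16777216) from by ac_rfl,
      Nat.xor_self, Nat.zero_xor]

-- the first xor/mod step only depends on the input mod 2^24
lemma sub1_congr (r : Int) : sub1 r = sub1 (PySem.Int.mod r 16777216) := by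
  have hMpos : (0:Int) < 16777216 := by norm_num
  have hr : PySem.Int.mod r 16777216 = r % 16777216 := PySem.Int.mod_eq_emod_of_pos hMpos
  unfold sub1
  rw [hr, PySem.Int.mod_eq_emod_of_pos hMpos, PySem.Int.mod_eq_emod_of_pos hMpos]
  rw [bxor_emod (r * 64) r (by constructor <;> intro h <;> nlinarith),
    bxor_emod ((r % 16777216) * 64) (r % 16777216)
      (by
        have h1 : 0 ≤ r % 16777216 := Int.emod_nonneg r (by norm_num)
        constructor <;> intro _ <;> [exact h1; positivity])]
  rw [Int.emod_emod_of_dvd r dvd_rfl]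
  congr 1
  rw [Int.mul_emod, Int.mul_emod (r % 16777216) 64, Int.emod_emod_of_dvd r dvd_rfl]

lemma stepI_reduce (r : Int) : stepI r = stepI (PySem.Int.mod r 16777216) := by
  unfold stepI
  rw [sub1_congr r]

-- ---------- the two loops agree ----------

lemma loops_eq (L : List Int) : ∀ (r : Int) (sol : List Int),
    (L.foldl gen_numBody (r, sol)).2
      = (L.foldl
          (fun (acc : Int × List Int) _ =>
            (pvNext acc.1, acc.2 ++ [PySem.Int.mod (pvNext acc.1) 10]))
          (PySem.Int.mod r 16777216, sol)).2 := by
  induction L with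
  | nil => intro r sol; rfl
  | cons a L ih =>
      intro r sol
      have hMpos : (0:Int) < 16777216 := by norm_num
      have h0 : 0 ≤ PySem.Int.mod r 16777216 := PySem.Int.mod_nonneg r hMpos
      have hlt : PySem.Int.mod r 16777216 < 16777216 := PySem.Int.mod_lt r hMpos
      have hcast : PySem.Int.mod r 16777216 = (((PySem.Int.mod r 16777216).toNat : Nat) : Int) :=
        (Int.toNat_of_nonneg h0).symm
      have hxlt : (PySem.Int.mod r 16777216).toNat < 16777216 := by omega
      have hnext : pvNext (PySem.Int.mod r 16777216) = stepI r := by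
        rw [hcast, pvNext_eq _ hxlt, ← hcast, ← stepI_reduce]
      have hfix : PySem.Int.mod (stepI r) 16777216 = stepI r := by
        rw [PySem.Int.mod_eq_emod_of_pos hMpos]
        exact Int.emod_eq_of_lt (stepI_nonneg r) (stepI_lt r)
      simp only [List.foldl_cons, body_eq]
      rw [hnext, ih (stepI r) (sol ++ [PySem.Int.mod (stepI r) 10]), hfix]

-- ===== VERDICT =====
theorem gen_num_spec : Claim_equal_gen_num := by
  intro num n _
  unfold Spec_gen_num gen_num gen_num_alt
  exact loops_eq (PySem.List.pyRange 0 n 1) num []
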